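-- pv_equiv track=rewrite | github.com/jeongho1209/CodingTest-python | 프로그래머스/unrated/181887. 홀수 vs 짝수/홀수 vs 짝수.py | solution
-- ===== SOURCE A (Python) =====
-- def solution(num_list):
--     answer1 = 0
--     answer2 = 0
--
--     for k, v in enumerate(num_list):
--         if k % 2 == 0:
--             answer1 += v
--         else:
--             answer2 += v
--
--     if answer1 > answer2:
--         return answer1
--     elif answer2 > answer1:
--         return answer2
--     else:
--         return answer1
-- ===== SOURCE B (Python) =====
-- def solution(num_list):
--     total = sum(num_list)
--     alt = 0
--     sign = 1
--     for v in num_list: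
--         alt += sign * v
--         sign = -sign
--     return (total + abs(alt)) // 2
-- ===== Notes on version B (the rewrite author's own statement) =====
-- stated objective: alternative
-- what changed: Replaces the parity-branching accumulator pair and the three-way comparison by the arithmetic identity max(e,o) = (e+o+|e-o|)//2: B computes the total sum and a sign-flipping alternating sum (no index parity test, no comparison) and combines them in closed form.
import Mathlib
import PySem

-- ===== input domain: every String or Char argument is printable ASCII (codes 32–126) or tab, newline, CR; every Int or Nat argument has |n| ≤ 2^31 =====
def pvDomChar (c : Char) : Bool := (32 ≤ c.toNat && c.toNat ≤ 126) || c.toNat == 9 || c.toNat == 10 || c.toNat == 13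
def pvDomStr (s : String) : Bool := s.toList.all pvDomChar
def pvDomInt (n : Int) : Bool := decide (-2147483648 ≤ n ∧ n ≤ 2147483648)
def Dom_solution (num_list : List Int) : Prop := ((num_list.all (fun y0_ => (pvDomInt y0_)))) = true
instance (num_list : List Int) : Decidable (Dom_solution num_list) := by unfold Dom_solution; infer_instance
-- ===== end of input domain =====

-- B replaces A's parity-branching loop and comparison chain by the identity max(e,o) = (e+o+|e-o|)//2,
-- computed from the total sum and a sign-flipping alternating sum (alternative decomposition, same cost).

-- ===== PORT A =====
def solution (num_list : List Int) : Int :=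
  let p := (PySem.List.enumerate num_list).foldl
    (fun (acc : Int × Int) (kv : Int × Int) =>
      if PySem.Int.mod kv.1 2 == 0 then (acc.1 + kv.2, acc.2) else (acc.1, acc.2 + kv.2))
    (0, 0)
  if p.1 > p.2 then p.1
  else if p.2 > p.1 then p.2
  else p.1

-- ===== PORT B =====
def solution_alt (num_list : List Int) : Int :=
  let total := num_list.sum
  let q := num_list.foldl
    (fun (acc : Int × Int) (v : Int) => (acc.1 + acc.2 * v, -acc.2)) (0, 1)
  PySem.Int.floordiv (total + |q.1|) 2

-- ===== PRECONDITION & SPEC =====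
def Spec_solution (num_list : List Int) (out : Int) : Prop := out = solution_alt num_list
instance (num_list : List Int) (out : Int) : Decidable (Spec_solution num_list out) := by unfold Spec_solution; infer_instance

-- ===== CLAIM (what is proved, stated in full; the proofs are below) =====
def Claim_equal_solution : Prop := ∀ (num_list : List Int), Dom_solution num_list → Spec_solution num_list (solution num_list)

-- ===== LEMMAS AND PROOFS =====

-- the elements at even positions of a list (proof helper)
def evens : List Int → List Int
  | [] => []
  | [x] => [x]
  | x :: _ :: t => x :: evens t

theorem evens_cons (x : Int) (t : List Int) : evens (x :: t) = x :: evens (t.drop 1) := by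
  cases t <;> simp [evens]

theorem fmod_two (a : Int) : a.fmod 2 = a % 2 := by
  rw [Int.fmod_eq_emod]; simp

theorem pymod_two (s : Int) : PySem.Int.mod s 2 = s % 2 := by
  simp [PySem.Int.mod, fmod_two]

theorem foldA (xs : List Int) : ∀ (s e o : Int),
    (PySem.List.enumerate xs s).foldl
      (fun (acc : Int × Int) (kv : Int × Int) =>
        if PySem.Int.mod kv.1 2 == 0 then (acc.1 + kv.2, acc.2) else (acc.1, acc.2 + kv.2))
      (e, o)
    = if s % 2 = 0 then (e + (evens xs).sum, o + (evens (xs.drop 1)).sum)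
      else (e + (evens (xs.drop 1)).sum, o + (evens xs).sum) := by
  induction xs with
  | nil => intro s e o; simp [PySem.List.enumerate, evens]
  | cons x t ih =>
    intro s e o
    simp only [PySem.List.enumerate, List.foldl_cons]
    by_cases hs : s % 2 = 0
    · have hs1 : (s + 1) % 2 ≠ 0 := by omega
      have hb : (PySem.Int.mod s 2 == 0) = true := by rw [pymod_two, hs]; rfl
      rw [hb]
      simp only [if_true, ih (s + 1) (e + x) o, if_neg hs1, if_pos hs]
      rw [evens_cons]
      simp only [List.sum_cons, List.drop_one, List.tail_cons, Prod.mk.injEq]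
      simp [add_assoc]
    · have hs1 : (s + 1) % 2 = 0 := by omega
      have h1 : s % 2 = 1 := by omega
      have hb : (PySem.Int.mod s 2 == 0) = false := by rw [pymod_two, h1]; rfl
      rw [hb]
      simp only [Bool.false_eq_true, if_false, ih (s + 1) e (o + x), if_pos hs1, if_neg hs]
      rw [evens_cons]
      simp only [List.sum_cons, List.drop_one, List.tail_cons, Prod.mk.injEq]
      simp [add_assoc]

theorem sum_split (xs : List Int) : xs.sum = (evens xs).sum + (evens (xs.drop 1)).sum := by
  induction xs using evens.induct with
  | case1 => simp [evens]
  | case2 x => simp [evens]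
  | case3 x y t ih => simp only [evens, evens_cons, List.sum_cons, List.drop_one, List.tail_cons, ih]; ring

theorem foldB (xs : List Int) : ∀ (a : Int),
    ((xs.foldl (fun (acc : Int × Int) (v : Int) => (acc.1 + acc.2 * v, -acc.2)) (a, 1)).1
        = a + (evens xs).sum - (evens (xs.drop 1)).sum)
    ∧ ((xs.foldl (fun (acc : Int × Int) (v : Int) => (acc.1 + acc.2 * v, -acc.2)) (a, -1)).1
        = a - (evens xs).sum + (evens (xs.drop 1)).sum) := by
  induction xs with
  | nil => intro a; simp [evens]
  | cons x t ih =>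
    intro a
    constructor
    · simp only [List.foldl_cons]
      have h := (ih (a + 1 * x)).2
      simp only [neg_neg] at h ⊢
      rw [h, evens_cons]
      simp only [List.sum_cons, List.drop_one, List.tail_cons]
      ring
    · simp only [List.foldl_cons]
      have h := (ih (a + -1 * x)).1
      simp only [neg_neg] at h ⊢
      rw [h, evens_cons]
      simp only [List.sum_cons, List.drop_one, List.tail_cons]
      ring

-- ===== VERDICT (by name: the statement is the Claim_ definition above) =====
theorem solution_spec : Claim_equal_solution := by
  intro xs _
  unfold Spec_solution
  simp only [solution, solution_alt]
  have hA := foldA xs 0 0 0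
  rw [if_pos (show (0 : ℤ) % 2 = 0 by decide)] at hA
  simp only [zero_add] at hA
  have hB := (foldB xs 0).1
  have hT := sum_split xs
  rw [hA, hB]
  set E := (evens xs).sum with hE
  set O := (evens (xs.drop 1)).sum with hO
  have h2 : xs.sum + |0 + E - O| = 2 * (if E > O then E else if O > E then O else E) := by
    rcases abs_cases (0 + E - O) with ⟨h, _⟩ | ⟨h, _⟩ <;> rw [h] <;> split_ifs <;> omega
  rw [h2]
  simp only [PySem.Int.floordiv, mul_comm (2 : ℤ)]
  exact (Int.mul_fdiv_cancel _ (by norm_num)).symm
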